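-- pv_equiv track=rewrite | github.com/Shivam-baghel/Python_Scaler | 2. Data Structures and Algorithm/2. Advance/02. Arrays - 2/Assignment/1. sum of all submatrices.py | sum_of_submatrices
-- ===== SOURCE A (Python) =====
-- def sum_of_submatrices(A):
--     n = len(A)
--     summ = 0
--     for i in range(n):
--         for j in range(n):
--             top_left = (i + 1) * (j + 1)
--             bottom_right = (n - i) * (n - j)
--             summ += top_left * bottom_right * A[i][j]
--     return summ
-- ===== SOURCE B (Python) =====
-- def sum_of_submatrices(A):
--     n = len(A)
--     summ = 0
--     for r1 in range(n):
--         for r2 in range(r1, n):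
--             for c1 in range(n):
--                 for c2 in range(c1, n):
--                     for i in range(r1, r2 + 1):
--                         for j in range(c1, c2 + 1):
--                             summ += A[i][j]
--     return summ
-- ===== Notes on version B (the rewrite author's own statement) =====
-- stated objective: alternative
-- what changed: Replaces the O(n^2) closed-form weighted sum (each element multiplied by the number of submatrices containing it) with a direct brute-force enumeration of every submatrix (r1..r2, c1..c2) that adds up its elements.
import Mathlib
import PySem

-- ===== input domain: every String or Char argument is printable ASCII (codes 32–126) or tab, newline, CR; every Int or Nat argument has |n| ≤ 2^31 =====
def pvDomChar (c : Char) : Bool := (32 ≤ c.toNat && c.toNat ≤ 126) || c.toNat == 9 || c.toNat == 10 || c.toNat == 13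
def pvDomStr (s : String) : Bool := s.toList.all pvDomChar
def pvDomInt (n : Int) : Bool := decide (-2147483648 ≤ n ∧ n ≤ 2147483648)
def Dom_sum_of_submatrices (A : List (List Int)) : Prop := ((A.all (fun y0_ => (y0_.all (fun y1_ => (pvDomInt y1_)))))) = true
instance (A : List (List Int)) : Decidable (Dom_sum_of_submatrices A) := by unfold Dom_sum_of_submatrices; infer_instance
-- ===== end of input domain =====

-- B replaces A's O(n^2) closed-form weighted sum by a brute-force enumeration of all
-- submatrices; equivalence of the return values is proved on Pre_ (where Python A returns).

-- A[i][j] for 0 ≤ i,j: exact for in-range indices; Pre_ excludes the out-of-range (raising) case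
def pyAt (A : List (List Int)) (i j : Int) : Int :=
  PySem.List.pyGetD (PySem.List.pyGetD A i []) j 0

-- ===== PORT A =====
def sum_of_submatrices (A : List (List Int)) : Int :=
  let n : Int := PySem.List.len A
  (PySem.List.pyRange 0 n 1).foldl (fun summ i =>
    (PySem.List.pyRange 0 n 1).foldl (fun summ j =>
      let top_left := (i + 1) * (j + 1)
      let bottom_right := (n - i) * (n - j)
      summ + top_left * bottom_right * pyAt A i j) summ) 0

-- ===== PORT B =====
def sum_of_submatrices_alt (A : List (List Int)) : Int :=
  let n : Int := PySem.List.len A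
  (PySem.List.pyRange 0 n 1).foldl (fun summ r1 =>
    (PySem.List.pyRange r1 n 1).foldl (fun summ r2 =>
      (PySem.List.pyRange 0 n 1).foldl (fun summ c1 =>
        (PySem.List.pyRange c1 n 1).foldl (fun summ c2 =>
          (PySem.List.pyRange r1 (r2 + 1) 1).foldl (fun summ i =>
            (PySem.List.pyRange c1 (c2 + 1) 1).foldl (fun summ j =>
              summ + pyAt A i j) summ) summ) summ) summ) summ) 0

-- ===== PRECONDITION & SPEC =====
-- Pre_: every row has at least len(A) entries — exactly where Python A (and B) return
-- instead of raising IndexError on A[i][j].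
def Pre_sum_of_submatrices (A : List (List Int)) : Prop :=
  ∀ row ∈ A, A.length ≤ row.length
instance (A : List (List Int)) : Decidable (Pre_sum_of_submatrices A) := by
  unfold Pre_sum_of_submatrices; infer_instance

def pvWitness_sum_of_submatrices : List (List Int) := [[1, 2], [3, 4]]

def Spec_sum_of_submatrices (A : List (List Int)) (out : Int) : Prop := out = sum_of_submatrices_alt A
instance (A : List (List Int)) (out : Int) : Decidable (Spec_sum_of_submatrices A out) := by unfold Spec_sum_of_submatrices; infer_instance

-- ===== CLAIM (what is proved, stated in full; the proofs are below) =====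
def Claim_equal_sum_of_submatrices : Prop := ∀ (A : List (List Int)), Dom_sum_of_submatrices A → Pre_sum_of_submatrices A → Spec_sum_of_submatrices A (sum_of_submatrices A)

-- ===== LEMMAS AND PROOFS =====

-- an additive foldl over range(a,b) is init + a Finset.Ico sum
theorem fps (a b : Int) (g : Int → Int) (init : Int) :
    (PySem.List.pyRange a b 1).foldl (fun s x => s + g x) init
      = init + ∑ x ∈ Finset.Ico a b, g x := by
  rw [PySem.List.foldl_add]
  congr 1
  have hfin : Finset.Ico a b = (PySem.List.pyRange a b 1).toFinset := by
    ext x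
    simp [PySem.List.mem_pyRange_one, Finset.mem_Ico]
  rw [hfin, List.sum_toFinset _ (PySem.List.nodup_pyRange_one a b)]

theorem sum_if_le (n i : Int) (h0 : 0 ≤ i) (hi : i < n) (c : Int) :
    (∑ r ∈ Finset.Ico 0 n, (if r ≤ i then c else 0)) = (i + 1) * c := by
  rw [← Finset.Ico_union_Ico_eq_Ico (by omega : (0:Int) ≤ i + 1) (by omega : i + 1 ≤ n),
    Finset.sum_union (Finset.Ico_disjoint_Ico_consecutive 0 (i+1) n)]
  have h1 : (∑ r ∈ Finset.Ico (0:Int) (i+1), (if r ≤ i then c else 0))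
      = ∑ r ∈ Finset.Ico (0:Int) (i+1), c := by
    apply Finset.sum_congr rfl
    intro r hr
    rw [Finset.mem_Ico] at hr
    simp [show r ≤ i by omega]
  have h2 : (∑ r ∈ Finset.Ico (i+1) n, (if r ≤ i then c else 0)) = 0 := by
    apply Finset.sum_eq_zero
    intro r hr
    rw [Finset.mem_Ico] at hr
    simp [show ¬ r ≤ i by omega]
  rw [h1, h2, Finset.sum_const, nsmul_eq_mul, add_zero, Int.card_Ico]
  congr 1
  omega

theorem sum_if_ge (n i r1 : Int) (hi : i < n) (c : Int) :
    (∑ r ∈ Finset.Ico r1 n, (if r1 ≤ i ∧ i ≤ r then c else 0))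
      = if r1 ≤ i then (n - i) * c else 0 := by
  by_cases h : r1 ≤ i
  · simp only [h, true_and, if_true]
    rw [← Finset.Ico_union_Ico_eq_Ico h (by omega : i ≤ n),
      Finset.sum_union (Finset.Ico_disjoint_Ico_consecutive r1 i n)]
    have h1 : (∑ r ∈ Finset.Ico r1 i, (if i ≤ r then c else 0)) = 0 := by
      apply Finset.sum_eq_zero
      intro r hr
      rw [Finset.mem_Ico] at hr
      simp [show ¬ i ≤ r by omega]
    have h2 : (∑ r ∈ Finset.Ico i n, (if i ≤ r then c else 0))
        = ∑ r ∈ Finset.Ico i n, c := by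
      apply Finset.sum_congr rfl
      intro r hr
      rw [Finset.mem_Ico] at hr
      simp [show i ≤ r by omega]
    rw [h1, h2, Finset.sum_const, nsmul_eq_mul, zero_add, Int.card_Ico]
    congr 1
    omega
  · simp [h]

-- the 1-D counting identity: summing g over every interval [r1,r2] ⊆ [0,n)
-- weights g i by (i+1)*(n-i)
theorem oneD (n : Int) (g : Int → Int) :
    (∑ r1 ∈ Finset.Ico 0 n, ∑ r2 ∈ Finset.Ico r1 n, ∑ i ∈ Finset.Ico r1 (r2 + 1), g i)
      = ∑ i ∈ Finset.Ico 0 n, (i + 1) * (n - i) * g i := by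
  have step1 : ∀ r1 ∈ Finset.Ico (0:Int) n, ∀ r2 ∈ Finset.Ico r1 n,
      (∑ i ∈ Finset.Ico r1 (r2 + 1), g i)
        = ∑ i ∈ Finset.Ico 0 n, (if r1 ≤ i ∧ i ≤ r2 then g i else 0) := by
    intro r1 hr1 r2 hr2
    rw [Finset.mem_Ico] at hr1 hr2
    symm
    calc (∑ i ∈ Finset.Ico (0:Int) n, (if r1 ≤ i ∧ i ≤ r2 then g i else 0))
        = ∑ i ∈ Finset.Ico (0:Int) n, (if i ∈ Finset.Ico r1 (r2 + 1) then g i else 0) := by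
          apply Finset.sum_congr rfl
          intro i _
          exact if_congr (by rw [Finset.mem_Ico]; omega) rfl rfl
      _ = ∑ i ∈ Finset.Ico (0:Int) n ∩ Finset.Ico r1 (r2 + 1), g i := Finset.sum_ite_mem _ _ _
      _ = ∑ i ∈ Finset.Ico r1 (r2 + 1), g i := by
          rw [Finset.inter_eq_right.mpr]
          intro x hx
          rw [Finset.mem_Ico] at hx ⊢
          omega
  calc (∑ r1 ∈ Finset.Ico 0 n, ∑ r2 ∈ Finset.Ico r1 n, ∑ i ∈ Finset.Ico r1 (r2 + 1), g i)
      = ∑ r1 ∈ Finset.Ico 0 n, ∑ r2 ∈ Finset.Ico r1 n,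
          ∑ i ∈ Finset.Ico 0 n, (if r1 ≤ i ∧ i ≤ r2 then g i else 0) := by
        apply Finset.sum_congr rfl
        intro r1 hr1
        exact Finset.sum_congr rfl (fun r2 hr2 => step1 r1 hr1 r2 hr2)
    _ = ∑ r1 ∈ Finset.Ico 0 n, ∑ i ∈ Finset.Ico 0 n,
          ∑ r2 ∈ Finset.Ico r1 n, (if r1 ≤ i ∧ i ≤ r2 then g i else 0) := by
        exact Finset.sum_congr rfl (fun r1 _ => Finset.sum_comm)
    _ = ∑ i ∈ Finset.Ico 0 n, ∑ r1 ∈ Finset.Ico 0 n,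
          ∑ r2 ∈ Finset.Ico r1 n, (if r1 ≤ i ∧ i ≤ r2 then g i else 0) := Finset.sum_comm
    _ = ∑ i ∈ Finset.Ico 0 n, (i + 1) * (n - i) * g i := by
        apply Finset.sum_congr rfl
        intro i hi
        rw [Finset.mem_Ico] at hi
        have : ∀ r1 ∈ Finset.Ico (0:Int) n,
            (∑ r2 ∈ Finset.Ico r1 n, (if r1 ≤ i ∧ i ≤ r2 then g i else 0))
              = if r1 ≤ i then (n - i) * g i else 0 :=
          fun r1 _ => sum_if_ge n i r1 hi.2 (g i)
        rw [Finset.sum_congr rfl this, sum_if_le n i hi.1 hi.2 ((n - i) * g i)]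
        ring

-- B's sextuple sum equals A's weighted double sum
theorem key (n : Int) (a : Int → Int → Int) :
    (∑ r1 ∈ Finset.Ico 0 n, ∑ r2 ∈ Finset.Ico r1 n,
      ∑ c1 ∈ Finset.Ico 0 n, ∑ c2 ∈ Finset.Ico c1 n,
        ∑ i ∈ Finset.Ico r1 (r2 + 1), ∑ j ∈ Finset.Ico c1 (c2 + 1), a i j)
      = ∑ i ∈ Finset.Ico 0 n, ∑ j ∈ Finset.Ico 0 n,
          (i + 1) * (j + 1) * ((n - i) * (n - j)) * a i j := by
  calc (∑ r1 ∈ Finset.Ico 0 n, ∑ r2 ∈ Finset.Ico r1 n,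
      ∑ c1 ∈ Finset.Ico 0 n, ∑ c2 ∈ Finset.Ico c1 n,
        ∑ i ∈ Finset.Ico r1 (r2 + 1), ∑ j ∈ Finset.Ico c1 (c2 + 1), a i j)
      = ∑ r1 ∈ Finset.Ico 0 n, ∑ r2 ∈ Finset.Ico r1 n,
          ∑ i ∈ Finset.Ico r1 (r2 + 1),
            ∑ c1 ∈ Finset.Ico 0 n, ∑ c2 ∈ Finset.Ico c1 n,
              ∑ j ∈ Finset.Ico c1 (c2 + 1), a i j := by
        apply Finset.sum_congr rfl; intro r1 _
        apply Finset.sum_congr rfl; intro r2 _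
        calc (∑ c1 ∈ Finset.Ico 0 n, ∑ c2 ∈ Finset.Ico c1 n,
            ∑ i ∈ Finset.Ico r1 (r2 + 1), ∑ j ∈ Finset.Ico c1 (c2 + 1), a i j)
            = ∑ c1 ∈ Finset.Ico 0 n, ∑ i ∈ Finset.Ico r1 (r2 + 1),
                ∑ c2 ∈ Finset.Ico c1 n, ∑ j ∈ Finset.Ico c1 (c2 + 1), a i j := by
              exact Finset.sum_congr rfl (fun c1 _ => Finset.sum_comm)
          _ = ∑ i ∈ Finset.Ico r1 (r2 + 1), ∑ c1 ∈ Finset.Ico 0 n,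
                ∑ c2 ∈ Finset.Ico c1 n, ∑ j ∈ Finset.Ico c1 (c2 + 1), a i j :=
              Finset.sum_comm
    _ = ∑ r1 ∈ Finset.Ico 0 n, ∑ r2 ∈ Finset.Ico r1 n,
          ∑ i ∈ Finset.Ico r1 (r2 + 1),
            ∑ j ∈ Finset.Ico 0 n, (j + 1) * (n - j) * a i j := by
        apply Finset.sum_congr rfl; intro r1 _
        apply Finset.sum_congr rfl; intro r2 _
        exact Finset.sum_congr rfl (fun i _ => oneD n (fun j => a i j))
    _ = ∑ i ∈ Finset.Ico 0 n, (i + 1) * (n - i) *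
          ∑ j ∈ Finset.Ico 0 n, (j + 1) * (n - j) * a i j :=
        oneD n (fun i => ∑ j ∈ Finset.Ico 0 n, (j + 1) * (n - j) * a i j)
    _ = ∑ i ∈ Finset.Ico 0 n, ∑ j ∈ Finset.Ico 0 n,
          (i + 1) * (j + 1) * ((n - i) * (n - j)) * a i j := by
        apply Finset.sum_congr rfl; intro i _
        rw [Finset.mul_sum]
        apply Finset.sum_congr rfl; intro j _
        ring

-- ===== VERDICT (by name: the statement is the Claim_ definition above) =====
theorem sum_of_submatrices_spec : Claim_equal_sum_of_submatrices := by
  intro A _ _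
  unfold Spec_sum_of_submatrices sum_of_submatrices sum_of_submatrices_alt
  simp only [fps, zero_add]
  exact (key (PySem.List.len A) (fun i j => pyAt A i j)).symm
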